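-- pv_equiv track=rewrite | github.com/Nghia03092004/nghia03092004.github.io | project_euler/problem_895/solution.py | derivative_sieve
-- ===== SOURCE A (Python) =====
-- from math import isqrt
--
-- def derivative_sieve(N):
--     """Compute n' for all n from 0 to N using a sieve."""
--     # For each n, accumulate sum(a_i / p_i) as a fraction
--     # Actually store n' = n * sum(a_i / p_i)
--     deriv = [0] * (N + 1)
--     # Use smallest prime factor sieve
--     spf = list(range(N + 1))
--     for i in range(2, isqrt(N) + 1):
--         if spf[i] == i:  # i is prime
--             for j in range(i * i, N + 1, i):
--                 if spf[j] == j: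
--                     spf[j] = i
--     for n in range(2, N + 1):
--         tmp = n
--         result = 0
--         while tmp > 1:
--             p = spf[tmp]
--             a = 0
--             while tmp % p == 0:
--                 a += 1
--                 tmp //= p
--             result += a * (n // p)
--         deriv[n] = result
--     return deriv
-- ===== SOURCE B (Python) =====
-- from math import isqrt
--
-- def derivative_sieve(N):
--     """Compute n' for all n from 0 to N: smallest-prime-factor sieve, then the
--     Leibniz recurrence n' = (n//p)' * p + n//p with p = spf[n], one O(1) step per n."""
--     deriv = [0] * (N + 1)
--     spf = list(range(N + 1))
--     for i in range(2, isqrt(N) + 1):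
--         if spf[i] == i:
--             for j in range(i * i, N + 1, i):
--                 if spf[j] == j:
--                     spf[j] = i
--     for n in range(2, N + 1):
--         p = spf[n]
--         m = n // p
--         deriv[n] = deriv[m] * p + m
--     return deriv
-- ===== Notes on version B (the rewrite author's own statement) =====
-- stated objective: faster
-- what changed: The per-n trial factorization over the spf table (inner while loops re-dividing each n) is replaced by the Leibniz dynamic-programming recurrence deriv[n] = deriv[n//spf[n]]*spf[n] + n//spf[n], one O(1) step per n over the already-computed table.
import Mathlib
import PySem

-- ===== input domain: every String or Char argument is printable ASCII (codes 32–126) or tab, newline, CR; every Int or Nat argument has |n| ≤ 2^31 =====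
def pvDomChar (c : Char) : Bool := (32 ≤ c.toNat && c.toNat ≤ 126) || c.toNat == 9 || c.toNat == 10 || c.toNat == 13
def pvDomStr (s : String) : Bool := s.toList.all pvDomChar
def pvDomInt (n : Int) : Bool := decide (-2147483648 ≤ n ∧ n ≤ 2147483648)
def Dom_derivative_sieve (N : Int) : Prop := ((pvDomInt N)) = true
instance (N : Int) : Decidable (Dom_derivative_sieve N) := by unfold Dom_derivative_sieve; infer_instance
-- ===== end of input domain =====

-- B replaces A's per-n trial factorization over the spf table by the Leibniz DP
-- recurrence deriv[n] = deriv[n//spf[n]]*spf[n] + n//spf[n]; measured faster (asymptotic).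


-- ===== PORT A =====
-- The smallest-prime-factor sieve: this code is IDENTICAL in A and B (both Pythons
-- carry it verbatim), so both ports share this one transliteration.
-- 'isqrt(N)' (raises for N < 0, excluded by Pre_) is Nat.sqrt N.toNat.
def pvSpfInner (N i : Int) (spf : List Int) : List Int :=
  (PySem.List.pyRange (i * i) (N + 1) i).foldl
    (fun spf j => if PySem.List.pyGet? spf j = some j then PySem.List.pySetD spf j i else spf)
    spf

def pvSpf (N : Int) : List Int :=
  (PySem.List.pyRange 2 ((Nat.sqrt N.toNat : Int) + 1) 1).foldl
    (fun spf i => if PySem.List.pyGet? spf i = some i then pvSpfInner N i spf else spf)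
    (PySem.List.pyRange 0 (N + 1) 1)

-- 'while tmp % p == 0: a += 1; tmp //= p'  (fuelled; under Pre_ the fuel suffices)
def pvAInner (p : Int) : Nat → Int → Int → Int × Int
  | 0, tmp, a => (a, tmp)
  | f + 1, tmp, a =>
    match PySem.Int.mod? tmp p with
    | none => (a, tmp)          -- ZeroDivisionError: unreachable under Pre_
    | some r =>
      if r = 0 then pvAInner p f (PySem.Int.floordiv tmp p) (a + 1) else (a, tmp)

-- 'while tmp > 1: p = spf[tmp]; …; result += a * (n // p)'
def pvAOuter (spf : List Int) (n : Int) : Nat → Int → Int → Int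
  | 0, _, result => result
  | f + 1, tmp, result =>
    if 1 < tmp then
      match PySem.List.pyGet? spf tmp with
      | none => result          -- IndexError: unreachable under Pre_
      | some p =>
        let s := pvAInner p tmp.toNat tmp 0
        pvAOuter spf n f s.2 (result + s.1 * PySem.Int.floordiv n p)
    else result

def derivative_sieve (N : Int) : List Int :=
  let spf := pvSpf N
  (PySem.List.pyRange 2 (N + 1) 1).foldl
    (fun deriv n => PySem.List.pySetD deriv n (pvAOuter spf n n.toNat n 0))
    (List.replicate (N + 1).toNat (0 : Int))

-- ===== PORT B =====
def derivative_sieve_alt (N : Int) : List Int :=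
  let spf := pvSpf N
  (PySem.List.pyRange 2 (N + 1) 1).foldl
    (fun deriv n =>
      let p := PySem.List.pyGetD spf n 0
      let m := PySem.Int.floordiv n p
      PySem.List.pySetD deriv n (PySem.List.pyGetD deriv m 0 * p + m))
    (List.replicate (N + 1).toNat (0 : Int))

-- ===== PRECONDITION & SPEC =====
-- For N < 0 both Pythons raise ValueError in isqrt; Pre_ excludes exactly those N.
def Pre_derivative_sieve (N : Int) : Prop := 0 ≤ N
instance (N : Int) : Decidable (Pre_derivative_sieve N) := by unfold Pre_derivative_sieve; infer_instance
def pvWitness_derivative_sieve : Int := 12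

def Spec_derivative_sieve (N : Int) (out : List Int) : Prop := out = derivative_sieve_alt N
instance (N : Int) (out : List Int) : Decidable (Spec_derivative_sieve N out) := by unfold Spec_derivative_sieve; infer_instance

-- ===== CLAIM (what is proved, stated in full; the proofs are below) =====
def Claim_equal_derivative_sieve : Prop := ∀ (N : Int), Dom_derivative_sieve N → Pre_derivative_sieve N → Spec_derivative_sieve N (derivative_sieve N)

-- ===== LEMMAS AND PROOFS =====

-- The arithmetic derivative n' = sum over prime powers q^k | n of n/q, written over ℤ.
def pvD (n : Nat) : Int :=
  ∑ q ∈ n.primeFactors, (n.factorization q : Int) * ((n / q : Nat) : Int)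

-- Same sum but with the first argument an Int divided by PySem floordiv (the shape A's loop builds).
def pvE (n : Int) (t : Nat) : Int :=
  ∑ q ∈ t.primeFactors, (t.factorization q : Int) * PySem.Int.floordiv n (q : Int)

-- ----- generic conditional-set fold (the sieve's inner loop shape) -----
lemma pv_condset (v : Int) (js : List Int) (hnd : js.Pairwise (· ≠ ·))
    (hpos : ∀ j ∈ js, 0 ≤ j) (l : List Int) :
    (js.foldl (fun l j => if PySem.List.pyGet? l j = some j then PySem.List.pySetD l j v else l) l).length
      = l.length ∧
    ∀ t : Nat, t < l.length →
      (js.foldl (fun l j => if PySem.List.pyGet? l j = some j then PySem.List.pySetD l j v else l) l).getD t 0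
        = if (t : Int) ∈ js ∧ l.getD t 0 = (t : Int) then v else l.getD t 0 := by
  induction js generalizing l with
  | nil => simp
  | cons j js ih =>
    have hj : 0 ≤ j := hpos j (by simp)
    have hpos' : ∀ x ∈ js, 0 ≤ x := fun x hx => hpos x (by simp [hx])
    have hne : ∀ x ∈ js, j ≠ x := (List.pairwise_cons.mp hnd).1
    have hnd' := (List.pairwise_cons.mp hnd).2
    have hjn : j = ((j.toNat : Nat) : Int) := (Int.toNat_of_nonneg hj).symm
    set l' := if PySem.List.pyGet? l j = some j then PySem.List.pySetD l j v else l with hl'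
    have hlen' : l'.length = l.length := by
      rw [hl']; split
      · rw [PySem.List.pySetD_of_nonneg l v hj]; simp
      · rfl
    have hel : ∀ t : Nat, t < l.length →
        l'.getD t 0 = if (t : Int) = j ∧ l.getD t 0 = (t : Int) then v else l.getD t 0 := by
      intro t htl
      rw [hl']
      by_cases hc : PySem.List.pyGet? l j = some j
      · rw [if_pos hc, PySem.List.pySetD_of_nonneg l v hj]
        have hget : l[j.toNat]? = some ((j.toNat : Int)) := by
          rw [hjn, PySem.List.pyGet?_natCast] at hc; exact hc
        by_cases htj : (t : Int) = j
        · have htn : t = j.toNat := by omega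
          have : l.getD t 0 = (t : Int) := by
            rw [List.getD_eq_getElem?_getD, htn, hget]; simp
          rw [if_pos ⟨htj, this⟩]
          subst htn
          simp [List.getD_eq_getElem?_getD, htl]
        · have htn : t ≠ j.toNat := by omega
          rw [if_neg (by tauto)]
          simp [List.getD_eq_getElem?_getD, List.getElem?_set_ne (by omega : j.toNat ≠ t)]
      · rw [if_neg hc]
        by_cases htj : (t : Int) = j ∧ l.getD t 0 = (t : Int)
        · exfalso
          apply hc
          obtain ⟨h1, h2⟩ := htj
          have htn : t = j.toNat := by omega
          rw [hjn, PySem.List.pyGet?_natCast, ← htn, List.getElem?_eq_getElem htl]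
          rw [List.getD_eq_getElem?_getD, List.getElem?_eq_getElem htl] at h2
          simp at h2 ⊢
          rw [h2, h1]
        · rw [if_neg htj]
    obtain ⟨ihlen, ihel⟩ := ih hnd' hpos' l'
    rw [List.foldl_cons, ← hl']
    refine ⟨by rw [ihlen, hlen'], ?_⟩
    intro t htl
    have h1 := ihel t (by rw [hlen']; exact htl)
    rw [hel t htl] at h1
    rw [h1]
    by_cases htj : (t : Int) = j
    · have hnm' : j ∉ js := fun hm => hne _ hm rfl
      by_cases hlt : l.getD t 0 = (t : Int)
      · rw [List.getD_eq_getElem?_getD] at hlt ⊢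
        simp [htj, hlt, hnm', List.getD_eq_getElem?_getD] at *
      · rw [List.getD_eq_getElem?_getD] at hlt ⊢
        simp [htj, hnm', List.getD_eq_getElem?_getD] at *
    · by_cases hm : (t : Int) ∈ js <;> by_cases hlt : l.getD t 0 = (t : Int) <;>
      · rw [List.getD_eq_getElem?_getD] at hlt ⊢
        simp [htj, hm, hlt, List.getD_eq_getElem?_getD] at *

-- ----- sieve invariant -----
def pvSInv (S b : Nat) (l : List Int) : Prop :=
  l.length = S + 1 ∧
  ∀ t : Nat, t ≤ S → l.getD t 0 = if 2 ≤ t ∧ t.minFac ≤ b then (t.minFac : Int) else (t : Int)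

lemma pvSInv_init (S : Nat) : pvSInv S 1 (PySem.List.pyRange 0 ((S : Int) + 1) 1) := by
  constructor
  · rw [PySem.List.length_pyRange_one]; omega
  · intro t ht
    have h2 : ¬(2 ≤ t ∧ t.minFac ≤ 1) := by
      rintro ⟨h2t, hm⟩
      have := (Nat.minFac_prime (by omega : t ≠ 1)).two_le
      omega
    rw [if_neg h2, PySem.List.pyRange_one]
    simp [List.getD_eq_getElem?_getD, ht]

lemma pvSInv_step (N : Int) (hN : 0 ≤ N) (b : Nat) (hb : 1 ≤ b) (hbS : b + 1 ≤ N.toNat)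
    (l : List Int) (h : pvSInv N.toNat b l) :
    pvSInv N.toNat (b + 1)
      (if PySem.List.pyGet? l ((b : Int) + 1) = some ((b : Int) + 1)
       then pvSpfInner N ((b : Int) + 1) l else l) := by
  obtain ⟨hlen, hel⟩ := h
  have hcast : ((b : Int) + 1) = (((b + 1 : Nat) : Nat) : Int) := by push_cast; ring
  set S := N.toNat with hS
  have hNS : N = (S : Int) := by omega
  set i := b + 1 with hi
  have hil : i < l.length := by omega
  by_cases hc : PySem.List.pyGet? l ((b : Int) + 1) = some ((b : Int) + 1)
  · rw [if_pos hc]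
    -- l[i] = i, so by the invariant minFac i = i, i.e. i is prime
    have hget : l[i]? = some ((i : Nat) : Int) := by
      rw [hcast, PySem.List.pyGet?_natCast] at hc; exact hc
    have hli : l.getD i 0 = ((i : Nat) : Int) := by
      rw [List.getD_eq_getElem?_getD, hget]; rfl
    have hmfi : i.minFac = i := by
      by_contra hne
      have h2i : 2 ≤ i ∧ i.minFac ≤ b := by
        constructor
        · omega
        · have h1 : i.minFac ≤ i := Nat.minFac_le (by omega)
          omega
      rw [hel i (by omega), if_pos h2i] at hli
      exact hne (by exact_mod_cast hli)
    have hpi : Nat.Prime i := Nat.prime_def_minFac.mpr ⟨by omega, hmfi⟩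
    unfold pvSpfInner
    have hstep : (0 : Int) < (b : Int) + 1 := by positivity
    have hnd : (PySem.List.pyRange (((b:Int)+1) * ((b:Int)+1)) (N + 1) ((b:Int)+1)).Pairwise (· ≠ ·) := by
      rw [PySem.List.pyRange_of_pos _ _ hstep]
      refine List.Nodup.map ?_ (List.nodup_range)
      intro x y hxy
      have : ((b:Int)+1) * (x : Int) = ((b:Int)+1) * (y : Int) := by linarith
      have := mul_left_cancel₀ (by omega : ((b:Int)+1) ≠ 0) this
      exact_mod_cast this
    have hpos : ∀ j ∈ PySem.List.pyRange (((b:Int)+1) * ((b:Int)+1)) (N + 1) ((b:Int)+1), 0 ≤ j := by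
      intro j hj
      have := (PySem.List.mem_pyRange_iff_of_pos hstep j).mp hj
      nlinarith [this.1]
    obtain ⟨clen, cel⟩ := pv_condset ((b:Int)+1)
      (PySem.List.pyRange (((b:Int)+1) * ((b:Int)+1)) (N + 1) ((b:Int)+1)) hnd hpos l
    constructor
    · omega
    intro t ht
    rw [cel t (by omega)]
    have hmem : ((t : Int) ∈ PySem.List.pyRange (((b:Int)+1) * ((b:Int)+1)) (N + 1) ((b:Int)+1))
        ↔ (i * i ≤ t ∧ i ∣ t) := by
      rw [PySem.List.mem_pyRange_iff_of_pos hstep]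
      constructor
      · rintro ⟨h1, _, h3⟩
        have hd : ((b:Int)+1) ∣ (t : Int) := by
          have hsq : ((b:Int)+1) ∣ ((b:Int)+1) * ((b:Int)+1) := Dvd.intro _ rfl
          simpa using dvd_add h3 hsq
        have h1' : ((i:Nat):Int) * ((i:Nat):Int) ≤ ((t:Nat):Int) := by rw [hi]; push_cast; linarith
        have hd' : ((i:Nat):Int) ∣ ((t:Nat):Int) := by rw [hi]; push_cast; exact hd
        exact ⟨by exact_mod_cast h1', by exact_mod_cast hd'⟩
      · rintro ⟨h1, h2⟩
        have h1' : ((b:Int)+1) * ((b:Int)+1) ≤ (t:Int) := by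
          have hx : ((i*i:Nat):Int) ≤ ((t:Nat):Int) := by exact_mod_cast h1
          rw [hi] at hx; push_cast at hx; linarith
        have hd : ((b:Int)+1) ∣ (t:Int) := by
          have hx : ((i:Nat):Int) ∣ ((t:Nat):Int) := by exact_mod_cast h2
          rw [hi] at hx; push_cast at hx; exact hx
        exact ⟨h1', by omega, dvd_sub hd (Dvd.intro _ rfl)⟩
    by_cases hcond : (t : Int) ∈ PySem.List.pyRange (((b:Int)+1) * ((b:Int)+1)) (N + 1) ((b:Int)+1)
        ∧ l.getD t 0 = (t : Int)
    · rw [if_pos hcond]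
      obtain ⟨hm, hlt⟩ := hcond
      obtain ⟨hii, hdvd⟩ := hmem.mp hm
      have h2t : 2 ≤ t := by
        have h4 : 2 * 2 ≤ i * i := Nat.mul_le_mul (by omega) (by omega)
        omega
      have hmft : t.minFac = i := by
        have hle : t.minFac ≤ i := Nat.minFac_le_of_dvd (by omega) hdvd
        by_contra hne
        have hb' : t.minFac ≤ b := by omega
        rw [hel t ht, if_pos ⟨h2t, hb'⟩] at hlt
        have heq : t.minFac = t := by exact_mod_cast hlt
        have hpt : Nat.Prime t := Nat.prime_def_minFac.mpr ⟨h2t, heq⟩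
        have hor : i = 1 ∨ i = t := (Nat.Prime.eq_one_or_self_of_dvd hpt i hdvd)
        have hlt2 : i < t := by nlinarith [hii]
        omega
      rw [if_pos ⟨h2t, by omega⟩, hmft]
      exact hcast
    · rw [if_neg hcond]
      rw [hel t ht]
      by_cases hA : 2 ≤ t ∧ t.minFac ≤ b
      · rw [if_pos hA, if_pos ⟨hA.1, by omega⟩]
      · rw [if_neg hA]
        by_cases hB : 2 ≤ t ∧ t.minFac ≤ b + 1
        · -- then minFac t = b + 1 = i, and t must be i itself
          have hmft : t.minFac = i := by omega
          by_cases hti : t = i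
          · rw [if_pos hB, hmft, hti]
          · exfalso
            have hdvd : i ∣ t := hmft ▸ Nat.minFac_dvd t
            obtain ⟨m, hm⟩ := hdvd
            have hm1 : m ≠ 1 := by rintro rfl; simp at hm; omega
            have hm0 : m ≠ 0 := by rintro rfl; simp at hm; omega
            have hmm : i ≤ m := by
              have hdm : m.minFac ∣ t := hm ▸ Dvd.dvd.mul_left (Nat.minFac_dvd m) i
              have : t.minFac ≤ m.minFac := Nat.minFac_le_of_dvd (Nat.minFac_prime hm1).two_le hdm
              have : m.minFac ≤ m := Nat.minFac_le (by omega)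
              omega
            have hiit : i * i ≤ t := by calc i * i ≤ i * m := by exact Nat.mul_le_mul_left i hmm
                                            _ = t := hm.symm
            apply hcond
            refine ⟨hmem.mpr ⟨hiit, ⟨m, hm⟩⟩, ?_⟩
            rw [hel t ht, if_neg hA]
        · rw [if_neg hB]
  · rw [if_neg hc]
    refine ⟨hlen, ?_⟩
    intro t ht
    rw [hel t ht]
    by_cases hA : 2 ≤ t ∧ t.minFac ≤ b
    · rw [if_pos hA, if_pos ⟨hA.1, by omega⟩]
    · rw [if_neg hA]
      by_cases hB : 2 ≤ t ∧ t.minFac ≤ b + 1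
      · exfalso
        have hmft : t.minFac = i := by omega
        have hpi : Nat.Prime i := hmft ▸ Nat.minFac_prime (by omega)
        have hit : i ≤ t := hmft ▸ Nat.minFac_le (by omega)
        have hli : l.getD i 0 = ((i : Nat) : Int) := by
          rw [hel i (by omega), if_neg]
          rintro ⟨_, hle⟩
          have := hpi.two_le
          have hmfi : i.minFac = i := (Nat.prime_def_minFac.mp hpi).2
          omega
        apply hc
        rw [hcast, PySem.List.pyGet?_natCast]
        rw [List.getD_eq_getElem?_getD, List.getElem?_eq_getElem (by omega : i < l.length)] at hli
        rw [List.getElem?_eq_getElem (by omega : i < l.length)]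
        simpa using hli
      · rw [if_neg hB]

lemma pvSpf_inv (N : Int) (hN : 0 ≤ N) :
    pvSInv N.toNat (max 1 (Nat.sqrt N.toNat)) (pvSpf N) := by
  have hNS : N = (N.toNat : Int) := by omega
  have key : ∀ b : Nat, 1 ≤ b → b ≤ Nat.sqrt N.toNat →
      pvSInv N.toNat b ((PySem.List.pyRange 2 ((b : Int) + 1) 1).foldl
        (fun spf i => if PySem.List.pyGet? spf i = some i then pvSpfInner N i spf else spf)
        (PySem.List.pyRange 0 (N + 1) 1)) := by
    intro b hb
    induction b, hb using Nat.le_induction with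
    | base =>
      intro _
      have hnil : PySem.List.pyRange 2 (((1 : Nat) : Int) + 1) 1 = [] :=
        PySem.List.pyRange_one_eq_nil (by norm_num)
      rw [hnil, List.foldl_nil]
      have := pvSInv_init N.toNat
      rw [← hNS] at this
      exact this
    | succ b hb ih =>
      intro hbs
      have hsqS : Nat.sqrt N.toNat ≤ N.toNat := Nat.sqrt_le_self _
      have hcast : ((b + 1 : Nat) : Int) + 1 = ((b : Int) + 1) + 1 := by push_cast; ring
      have hsplit : PySem.List.pyRange 2 (((b : Int) + 1) + 1) 1
          = PySem.List.pyRange 2 ((b : Int) + 1) 1 ++ [(b : Int) + 1] :=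
        PySem.List.pyRange_one_succ_right (by omega)
      rw [hcast, hsplit, List.foldl_append, List.foldl_cons, List.foldl_nil]
      exact pvSInv_step N hN b hb (by omega) _ (ih (by omega))
  by_cases hsq : Nat.sqrt N.toNat ≤ 1
  · have hnil : PySem.List.pyRange 2 ((Nat.sqrt N.toNat : Int) + 1) 1 = [] :=
      PySem.List.pyRange_one_eq_nil (by exact_mod_cast (by omega : (Nat.sqrt N.toNat : Int) + 1 ≤ 2))
    unfold pvSpf
    rw [hnil, List.foldl_nil]
    have hmax : max 1 (Nat.sqrt N.toNat) = 1 := by omega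
    rw [hmax]
    have := pvSInv_init N.toNat
    rw [← hNS] at this
    exact this
  · have h1 : 1 ≤ Nat.sqrt N.toNat := by omega
    have hmax : max 1 (Nat.sqrt N.toNat) = Nat.sqrt N.toNat := by omega
    rw [hmax]
    exact key (Nat.sqrt N.toNat) h1 le_rfl

lemma pvSpf_spec (N : Int) (hN : 0 ≤ N) :
    (pvSpf N).length = N.toNat + 1 ∧
    ∀ t : Nat, t ≤ N.toNat → (pvSpf N).getD t 0 = if 2 ≤ t then (t.minFac : Int) else (t : Int) := by
  obtain ⟨hlen, hel⟩ := pvSpf_inv N hN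
  refine ⟨hlen, ?_⟩
  intro t ht
  rw [hel t ht]
  by_cases h2 : 2 ≤ t
  · rw [if_pos h2]
    by_cases hm : t.minFac ≤ max 1 (Nat.sqrt N.toNat)
    · rw [if_pos ⟨h2, hm⟩]
    · rw [if_neg (by tauto)]
      by_cases hp : Nat.Prime t
      · rw [(Nat.prime_def_minFac.mp hp).2]
      · exfalso
        have hsq := Nat.minFac_sq_le_self (by omega) hp
        rw [pow_two] at hsq
        have : t.minFac ≤ Nat.sqrt N.toNat := Nat.le_sqrt.mpr (by omega)
        omega
  · rw [if_neg h2, if_neg (by tauto)]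

-- ----- A's factor loops -----
lemma pvAInner_eq (p : Nat) (hp : Nat.Prime p) :
    ∀ (t : Nat), 1 ≤ t → ∀ (f : Nat), t ≤ f → ∀ (a : Int),
    pvAInner (p : Int) f (t : Int) a
      = (a + (t.factorization p : Int), ((t / p ^ t.factorization p : Nat) : Int)) := by
  intro t
  induction t using Nat.strong_induction_on with
  | _ t ih =>
  intro ht f hf a
  have hp2 : 2 ≤ p := hp.two_le
  match f with
  | 0 => omega
  | Nat.succ f =>
    show (match PySem.Int.mod? (t : Int) (p : Int) with
      | none => ((a, (t : Int)) : Int × Int)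
      | some r => if r = 0 then pvAInner (p : Int) f (PySem.Int.floordiv (t : Int) (p : Int)) (a + 1)
                  else (a, (t : Int))) = _
    have hp0 : (p : Int) ≠ 0 := by exact_mod_cast (by omega : p ≠ 0)
    simp only [PySem.Int.mod?_of_ne_zero hp0, PySem.Int.mod_natCast]
    by_cases hdvd : p ∣ t
    · have hr : ((t % p : Nat) : Int) = 0 := by
        rw [Nat.mod_eq_zero_of_dvd hdvd]; rfl
      rw [if_pos hr, PySem.Int.floordiv_natCast]
      have htp1 : 1 ≤ t / p := Nat.one_le_div_iff (by omega) |>.mpr (Nat.le_of_dvd (by omega) hdvd)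
      have htpt : t / p < t := Nat.div_lt_self (by omega) (by omega)
      have hv1 : 1 ≤ t.factorization p := hp.factorization_pos_of_dvd (by omega) hdvd
      rw [ih (t / p) htpt htp1 f (by omega) (a + 1)]
      have hw : (t / p).factorization p = t.factorization p - 1 := by
        rw [Nat.factorization_div hdvd]
        simp [hp.factorization]
      rw [Prod.mk.injEq]
      refine ⟨?_, ?_⟩
      · show a + 1 + ((t / p).factorization p : Int) = a + (t.factorization p : Int)
        rw [hw]; push_cast [hv1]; ring
      · show (((t / p) / p ^ ((t / p).factorization p) : Nat) : Int) = ((t / p ^ t.factorization p : Nat) : Int)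
        rw [hw]
        congr 1
        rw [Nat.div_div_eq_div_mul]
        congr 1
        rw [← pow_succ']
        congr 1
        omega
    · have hr : ¬ ((t % p : Nat) : Int) = 0 := by
        intro h
        exact hdvd (Nat.dvd_of_mod_eq_zero (by exact_mod_cast h))
      rw [if_neg hr]
      have hv : t.factorization p = 0 := Nat.factorization_eq_zero_of_not_dvd hdvd
      rw [hv]
      simp

lemma pvE_split (n : Int) (t : Nat) (ht : 2 ≤ t) :
    pvE n t = (t.factorization t.minFac : Int) * PySem.Int.floordiv n (t.minFac : Int)
      + pvE n (t / t.minFac ^ t.factorization t.minFac) := by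
  have hp : Nat.Prime t.minFac := Nat.minFac_prime (by omega)
  have hmem : t.minFac ∈ t.primeFactors :=
    Nat.mem_primeFactors.mpr ⟨hp, Nat.minFac_dvd t, by omega⟩
  unfold pvE
  rw [← Finset.add_sum_erase _ _ hmem]
  congr 1
  have hfac : (t / t.minFac ^ t.factorization t.minFac).factorization
      = t.factorization.erase t.minFac := Nat.factorization_ordCompl t t.minFac
  have hpf : (t / t.minFac ^ t.factorization t.minFac).primeFactors
      = t.primeFactors.erase t.minFac := by
    rw [← Nat.support_factorization, hfac, Finsupp.support_erase, Nat.support_factorization]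
  rw [hpf]
  refine Finset.sum_congr rfl ?_
  intro q hq
  have hqne : q ≠ t.minFac := (Finset.mem_erase.mp hq).1
  rw [hfac, Finsupp.erase_ne hqne]

lemma pvAOuter_eq (S : Nat) (spf : List Int)
    (hspf : ∀ u : Nat, 2 ≤ u → u ≤ S → PySem.List.pyGet? spf (u : Int) = some (u.minFac : Int)) :
    ∀ (t : Nat), 1 ≤ t → t ≤ S → ∀ (f : Nat), t ≤ f → ∀ (n res : Int),
    pvAOuter spf n f (t : Int) res = res + pvE n t := by
  intro t
  induction t using Nat.strong_induction_on with
  | _ t ih =>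
  intro ht htS f hf n res
  match f with
  | 0 => omega
  | Nat.succ f =>
    by_cases h1 : t = 1
    · subst h1
      show (if (1 : Int) < 1 then _ else res) = res + pvE n 1
      rw [if_neg (by norm_num)]
      simp [pvE]
    · have h2 : 2 ≤ t := by omega
      have hpy := hspf t h2 htS
      have hlt : (1 : Int) < (t : Int) := by exact_mod_cast (by omega : 1 < t)
      show (if (1 : Int) < (t : Int) then
          match PySem.List.pyGet? spf (t : Int) with
          | none => res
          | some p =>
            let s := pvAInner p ((t : Int)).toNat (t : Int) 0
            pvAOuter spf n f s.2 (res + s.1 * PySem.Int.floordiv n p)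
        else res) = res + pvE n t
      rw [if_pos hlt, hpy]
      show (let s := pvAInner ((t.minFac : Nat) : Int) ((t : Int)).toNat (t : Int) 0
            pvAOuter spf n f s.2 (res + s.1 * PySem.Int.floordiv n ((t.minFac : Nat) : Int)))
          = res + pvE n t
      have hp : Nat.Prime t.minFac := Nat.minFac_prime (by omega)
      have htoNat : ((t : Int)).toNat = t := Int.toNat_natCast t
      rw [htoNat, pvAInner_eq t.minFac hp t ht t le_rfl 0]
      set v := t.factorization t.minFac with hv
      set t' := t / t.minFac ^ v with ht'
      have hv1 : 1 ≤ v := hp.factorization_pos_of_dvd (by omega) (Nat.minFac_dvd t)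
      have ht'1 : 1 ≤ t' := by
        rw [ht']
        exact Nat.ordCompl_pos t.minFac (by omega)
      have ht't : t' < t := by
        rw [ht']
        calc t / t.minFac ^ v ≤ t / t.minFac := by
              apply Nat.div_le_div_left (Nat.le_self_pow (by omega) _) (by have := hp.two_le; omega)
          _ < t := Nat.div_lt_self (by omega) (by have := hp.two_le; omega)
      have := ih t' ht't ht'1 (by omega) f (by omega) n (res + (0 + (v : Int)) * PySem.Int.floordiv n ((t.minFac : Nat) : Int))
      show pvAOuter spf n f ((t' : Nat) : Int) (res + (0 + (v : Int)) * PySem.Int.floordiv n ((t.minFac : Nat) : Int)) = res + pvE n t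
      rw [this, pvE_split n t h2, ← hv, ← ht']
      ring

lemma pvE_self (t : Nat) : pvE (t : Int) t = pvD t := by
  unfold pvE pvD
  refine Finset.sum_congr rfl ?_
  intro q hq
  rw [PySem.Int.floordiv_natCast]

-- ----- Leibniz recurrence for pvD (B's step) -----
lemma pvD_one : pvD 1 = 0 := by simp [pvD]

lemma pvD_leibniz (n : Nat) (hn : 2 ≤ n) :
    pvD n = pvD (n / n.minFac) * (n.minFac : Int) + ((n / n.minFac : Nat) : Int) := by
  set p := n.minFac with hp'
  set m := n / p with hm'
  have hp : Nat.Prime p := Nat.minFac_prime (by omega)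
  have hpd : p ∣ n := Nat.minFac_dvd n
  have hnm : n = p * m := (Nat.mul_div_cancel' hpd).symm
  have hm0 : m ≠ 0 := by
    intro h
    rw [h, mul_zero] at hnm
    omega
  have hp0 : p ≠ 0 := hp.pos.ne'
  have hfac : n.factorization = p.factorization + m.factorization := by
    rw [hnm]; exact Nat.factorization_mul hp0 hm0
  have hpmem : p ∈ n.primeFactors := Nat.mem_primeFactors.mpr ⟨hp, hpd, by omega⟩
  have hsub : m.primeFactors ⊆ n.primeFactors := by
    rw [hnm]
    rw [Nat.primeFactors_mul hp0 hm0]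
    exact Finset.subset_union_right
  have step1 : pvD n
      = ∑ q ∈ n.primeFactors, ((m.factorization q : Int) + if q = p then 1 else 0) * ((n / q : Nat) : Int) := by
    unfold pvD
    refine Finset.sum_congr rfl ?_
    intro q _
    congr 1
    rw [hfac]
    rw [Finsupp.add_apply]
    rw [hp.factorization]
    rw [Finsupp.single_apply]
    push_cast
    by_cases hqp : q = p
    · simp [hqp]; ring
    · simp [hqp, Ne.symm hqp]
  rw [step1]
  have step2 : ∑ q ∈ n.primeFactors, ((m.factorization q : Int) + if q = p then 1 else 0) * ((n / q : Nat) : Int)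
      = (∑ q ∈ n.primeFactors, (m.factorization q : Int) * ((n / q : Nat) : Int))
        + (∑ q ∈ n.primeFactors, (if q = p then 1 else 0) * ((n / q : Nat) : Int)) := by
    rw [← Finset.sum_add_distrib]
    refine Finset.sum_congr rfl ?_
    intro q _
    ring
  rw [step2]
  have step3 : ∑ q ∈ n.primeFactors, (if q = p then 1 else 0) * ((n / q : Nat) : Int) = ((m : Nat) : Int) := by
    have hterm : ∀ q ∈ n.primeFactors,
        (if q = p then (1 : Int) else 0) * ((n / q : Nat) : Int)
          = if q = p then ((n / q : Nat) : Int) else 0 := by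
      intro q _
      split_ifs <;> ring
    rw [Finset.sum_congr rfl hterm, Finset.sum_ite_eq' n.primeFactors p (fun q => ((n / q : Nat) : Int)),
      if_pos hpmem]
  rw [step3]
  have hzero : ∀ q ∈ n.primeFactors, q ∉ m.primeFactors →
      (m.factorization q : Int) * ((n / q : Nat) : Int) = 0 := by
    intro q _ hq
    have : m.factorization q = 0 := by
      by_contra h
      exact hq (by rw [← Nat.support_factorization]; exact Finsupp.mem_support_iff.mpr h)
    rw [this]
    simp
  have step4 : ∑ q ∈ n.primeFactors, (m.factorization q : Int) * ((n / q : Nat) : Int)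
      = pvD m * (p : Int) := by
    rw [← Finset.sum_subset hsub hzero]
    unfold pvD
    rw [Finset.sum_mul]
    refine Finset.sum_congr rfl ?_
    intro q hq
    have hqm : q ∣ m := Nat.dvd_of_mem_primeFactors hq
    rw [hnm, Nat.mul_div_assoc p hqm]
    push_cast
    ring
  rw [step4]

-- ----- the two main folds -----
def pvDInv (S b : Nat) (l : List Int) : Prop :=
  l.length = S + 1 ∧
  ∀ t : Nat, t ≤ S → l.getD t 0 = if 2 ≤ t ∧ t ≤ b then pvD t else 0

lemma pvDInv_set (S b : Nat) (hb : 1 ≤ b) (hbS : b + 1 ≤ S) (l : List Int) (h : pvDInv S b l) :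
    pvDInv S (b + 1) (l.set (b + 1) (pvD (b + 1))) := by
  obtain ⟨hlen, hel⟩ := h
  refine ⟨by simp [hlen], ?_⟩
  intro t ht
  rw [List.getD_eq_getElem?_getD, List.getElem?_set]
  by_cases htb : b + 1 = t
  · subst htb
    rw [if_pos rfl, if_pos (by omega)]
    simp only [Option.getD_some]
    rw [if_pos ⟨by omega, le_rfl⟩]
  · rw [if_neg htb, ← List.getD_eq_getElem?_getD, hel t ht]
    by_cases hA : 2 ≤ t ∧ t ≤ b
    · rw [if_pos hA, if_pos ⟨hA.1, by omega⟩]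
    · rw [if_neg hA, if_neg (by omega : ¬(2 ≤ t ∧ t ≤ b + 1))]

lemma pvDInv_stepA (S : Nat) (spf : List Int)
    (hspf : ∀ u : Nat, 2 ≤ u → u ≤ S → PySem.List.pyGet? spf (u : Int) = some (u.minFac : Int))
    (b : Nat) (hb : 1 ≤ b) (hbS : b + 1 ≤ S) (l : List Int) (h : pvDInv S b l) :
    pvDInv S (b + 1)
      (PySem.List.pySetD l ((b : Int) + 1) (pvAOuter spf ((b : Int) + 1) ((b : Int) + 1).toNat ((b : Int) + 1) 0)) := by
  have hcast : ((b : Int) + 1) = ((b + 1 : Nat) : Int) := by push_cast; ring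
  have htn : ((b : Int) + 1).toNat = b + 1 := by omega
  have hval : pvAOuter spf ((b : Int) + 1) ((b : Int) + 1).toNat ((b : Int) + 1) 0 = pvD (b + 1) := by
    rw [htn, hcast, pvAOuter_eq S spf hspf (b + 1) (by omega) hbS (b + 1) le_rfl _ 0, pvE_self]
    ring
  rw [hval, hcast, PySem.List.pySetD_natCast]
  exact pvDInv_set S b hb hbS l h

lemma pvDInv_stepB (S : Nat) (spf : List Int)
    (hspf2 : ∀ u : Nat, u ≤ S → spf.getD u 0 = if 2 ≤ u then (u.minFac : Int) else (u : Int))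
    (b : Nat) (hb : 1 ≤ b) (hbS : b + 1 ≤ S) (l : List Int) (h : pvDInv S b l) :
    pvDInv S (b + 1)
      (PySem.List.pySetD l ((b : Int) + 1)
        (PySem.List.pyGetD l (PySem.Int.floordiv ((b : Int) + 1) (PySem.List.pyGetD spf ((b : Int) + 1) 0)) 0
            * PySem.List.pyGetD spf ((b : Int) + 1) 0
          + PySem.Int.floordiv ((b : Int) + 1) (PySem.List.pyGetD spf ((b : Int) + 1) 0))) := by
  have hcast : ((b : Int) + 1) = ((b + 1 : Nat) : Int) := by push_cast; ring
  set P := (b + 1).minFac with hP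
  have hp : Nat.Prime P := Nat.minFac_prime (by omega)
  have hPd : P ∣ (b + 1) := Nat.minFac_dvd _
  have hP2 : 2 ≤ P := hp.two_le
  have hspfP : PySem.List.pyGetD spf ((b : Int) + 1) 0 = (P : Int) := by
    rw [hcast, PySem.List.pyGetD_natCast, hspf2 (b + 1) hbS, if_pos (by omega)]
  set M := (b + 1) / P with hM
  have hM1 : 1 ≤ M := (Nat.one_le_div_iff (by omega)).mpr (Nat.le_of_dvd (by omega) hPd)
  have hMb : M ≤ b := by
    have : M < b + 1 := Nat.div_lt_self (by omega) (by omega)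
    omega
  have hflo : PySem.Int.floordiv ((b : Int) + 1) ((P : Nat) : Int) = ((M : Nat) : Int) := by
    rw [hcast, PySem.Int.floordiv_natCast]
  obtain ⟨hlen, hel⟩ := h
  have hgetM : PySem.List.pyGetD l ((M : Nat) : Int) 0 = pvD M := by
    rw [PySem.List.pyGetD_natCast, hel M (by omega)]
    by_cases hM2 : 2 ≤ M
    · rw [if_pos ⟨hM2, hMb⟩]
    · have hMeq : M = 1 := by omega
      rw [if_neg (by omega), hMeq, pvD_one]
  rw [hspfP, hflo, hgetM]
  have hvd : pvD M * ((P : Nat) : Int) + ((M : Nat) : Int) = pvD (b + 1) :=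
    (pvD_leibniz (b + 1) (by omega)).symm
  rw [hvd, hcast, PySem.List.pySetD_natCast]
  exact pvDInv_set S b hb hbS l ⟨hlen, hel⟩

lemma pv_fold_inv (S : Nat) (step : List Int → Int → List Int)
    (hstep : ∀ b : Nat, 1 ≤ b → b + 1 ≤ S → ∀ l, pvDInv S b l → pvDInv S (b + 1) (step l ((b : Int) + 1)))
    (hinit : pvDInv S 1 (List.replicate (S + 1) (0 : Int))) :
    ∀ b : Nat, 1 ≤ b → b ≤ S →
      pvDInv S b ((PySem.List.pyRange 2 ((b : Int) + 1) 1).foldl step (List.replicate (S + 1) (0 : Int))) := by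
  intro b hb
  induction b, hb using Nat.le_induction with
  | base =>
    intro _
    have hnil : PySem.List.pyRange 2 (((1 : Nat) : Int) + 1) 1 = [] :=
      PySem.List.pyRange_one_eq_nil (by norm_num)
    rw [hnil, List.foldl_nil]
    exact hinit
  | succ b hb ih =>
    intro hbS
    have hcast : ((b + 1 : Nat) : Int) + 1 = ((b : Int) + 1) + 1 := by push_cast; ring
    have hsplit : PySem.List.pyRange 2 (((b : Int) + 1) + 1) 1
        = PySem.List.pyRange 2 ((b : Int) + 1) 1 ++ [(b : Int) + 1] :=
      PySem.List.pyRange_one_succ_right (by omega)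
    rw [hcast, hsplit, List.foldl_append, List.foldl_cons, List.foldl_nil]
    exact hstep b hb hbS _ (ih (by omega))

lemma pv_main (S : Nat) : derivative_sieve (S : Int) = derivative_sieve_alt (S : Int) := by
  have hN : (0 : Int) ≤ (S : Int) := by positivity
  have htoNat : ((S : Int)).toNat = S := Int.toNat_natCast S
  have hrep : ((S : Int) + 1).toNat = S + 1 := by omega
  obtain ⟨hslen, hsel⟩ := pvSpf_spec (S : Int) hN
  rw [htoNat] at hslen hsel
  have hspf : ∀ u : Nat, 2 ≤ u → u ≤ S →
      PySem.List.pyGet? (pvSpf (S : Int)) (u : Int) = some (u.minFac : Int) := by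
    intro u h2 huS
    rw [PySem.List.pyGet?_natCast, List.getElem?_eq_getElem (by omega : u < (pvSpf (S : Int)).length)]
    have he := hsel u huS
    rw [List.getD_eq_getElem?_getD, List.getElem?_eq_getElem (by omega : u < (pvSpf (S : Int)).length)] at he
    simp only [Option.getD_some] at he
    rw [he, if_pos h2]
  by_cases hS1 : S ≤ 1
  · have hnil : PySem.List.pyRange 2 ((S : Int) + 1) 1 = [] :=
      PySem.List.pyRange_one_eq_nil (by exact_mod_cast (by omega : (S : Int) + 1 ≤ 2))
    simp only [derivative_sieve, derivative_sieve_alt, hnil, List.foldl_nil]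
  · have hS2 : 1 ≤ S := by omega
    have hinit : pvDInv S 1 (List.replicate (S + 1) (0 : Int)) := by
      refine ⟨by simp, ?_⟩
      intro t ht
      rw [List.getD_eq_getElem?_getD, List.getElem?_replicate]
      rw [if_pos (by omega : t < S + 1)]
      simp only [Option.getD_some]
      rw [if_neg (by omega : ¬(2 ≤ t ∧ t ≤ 1))]
    have hA := pv_fold_inv S
      (fun deriv n => PySem.List.pySetD deriv n (pvAOuter (pvSpf (S : Int)) n n.toNat n 0))
      (fun b hb hbS l h => pvDInv_stepA S (pvSpf (S : Int)) hspf b hb hbS l h) hinit S hS2 le_rfl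
    have hB := pv_fold_inv S
      (fun deriv n =>
        let p := PySem.List.pyGetD (pvSpf (S : Int)) n 0
        let m := PySem.Int.floordiv n p
        PySem.List.pySetD deriv n (PySem.List.pyGetD deriv m 0 * p + m))
      (fun b hb hbS l h => pvDInv_stepB S (pvSpf (S : Int)) hsel b hb hbS l h) hinit S hS2 le_rfl
    obtain ⟨hAl, hAe⟩ := hA
    obtain ⟨hBl, hBe⟩ := hB
    show (PySem.List.pyRange 2 ((S : Int) + 1) 1).foldl
        (fun deriv n => PySem.List.pySetD deriv n (pvAOuter (pvSpf (S : Int)) n n.toNat n 0))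
        (List.replicate ((S : Int) + 1).toNat (0 : Int))
      = (PySem.List.pyRange 2 ((S : Int) + 1) 1).foldl
        (fun deriv n =>
          let p := PySem.List.pyGetD (pvSpf (S : Int)) n 0
          let m := PySem.Int.floordiv n p
          PySem.List.pySetD deriv n (PySem.List.pyGetD deriv m 0 * p + m))
        (List.replicate ((S : Int) + 1).toNat (0 : Int))
    rw [hrep]
    apply List.ext_getElem (by rw [hAl, hBl])
    intro i h1 h2
    have hi : i ≤ S := by omega
    have e1 := hAe i hi
    have e2 := hBe i hi
    rw [List.getD_eq_getElem?_getD, List.getElem?_eq_getElem h1, Option.getD_some] at e1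
    rw [List.getD_eq_getElem?_getD, List.getElem?_eq_getElem h2, Option.getD_some] at e2
    rw [e1, e2]

-- ===== VERDICT (by name: the statement is the Claim_ definition above) =====
theorem derivative_sieve_spec : Claim_equal_derivative_sieve := by
  intro N _ hpre
  unfold Spec_derivative_sieve
  have h : N = (N.toNat : Int) := (Int.toNat_of_nonneg hpre).symm
  rw [h]
  exact pv_main N.toNat
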